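-- pv_equiv track=rewrite | github.com/guptapranav4299/python-ds-algo-prep | dynamic_programming/combinatorics/friends_pairing_problem.py | friends_pairing_problem
-- ===== SOURCE A (Python) =====
-- def friends_pairing_problem(n):
--     mod = 1000000007
--     if n <= 2:
--         return n
--     f = [0 for i in range(n + 1)]
--     f[0] = 0
--     f[1] = 1
--     f[2] = 2
--     for i in range(3, n + 1):
--         f[i] = ((f[i - 1] % mod) + ((i - 1)*f[i - 2])% mod) % mod
--
--     return f[n] % mod
-- ===== SOURCE B (Python) =====
-- _MOD = 1000000007
--
--
-- def _mul(x, y):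
--     a, b, c, d = x
--     e, f, g, h = y
--     return ((a * e + b * g) % _MOD, (a * f + b * h) % _MOD,
--             (c * e + d * g) % _MOD, (c * f + d * h) % _MOD)
--
--
-- def _prod(lo, hi):
--     # product step(hi-1) * ... * step(lo), where step(i) = [[0, 1], [i-1, 1]]
--     if hi - lo <= 1:
--         return (0, 1, (lo - 1) % _MOD, 1)
--     mid = (lo + hi) // 2
--     return _mul(_prod(mid, hi), _prod(lo, mid))
--
--
-- def friends_pairing_problem(n):
--     if n <= 2:
--         return n
--     _a, _b, c, d = _prod(3, n + 1)
--     return (c + 2 * d) % _MOD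
-- ===== Notes on version B (the rewrite author's own statement) =====
-- stated objective: alternative
-- what changed: B reformulates the recurrence as a product of 2x2 matrices [[0,1],[i-1,1]] over i=3..n, computed by divide-and-conquer modular matrix multiplication and applied to the seed vector (1,2), instead of A's bottom-up DP table.
import Mathlib
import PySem

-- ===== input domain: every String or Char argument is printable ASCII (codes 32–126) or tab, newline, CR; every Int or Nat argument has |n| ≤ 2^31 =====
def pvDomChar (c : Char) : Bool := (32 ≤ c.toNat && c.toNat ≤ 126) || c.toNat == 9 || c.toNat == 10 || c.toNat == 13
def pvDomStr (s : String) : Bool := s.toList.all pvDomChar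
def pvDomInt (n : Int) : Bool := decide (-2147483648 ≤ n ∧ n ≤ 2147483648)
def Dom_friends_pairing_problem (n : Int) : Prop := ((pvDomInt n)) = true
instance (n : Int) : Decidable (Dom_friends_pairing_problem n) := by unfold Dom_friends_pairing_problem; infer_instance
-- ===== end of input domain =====

-- B computes the answer as a divide-and-conquer product of 2x2 matrices [[0,1],[i-1,1]] mod 1e9+7
-- applied to the seed vector (1,2), instead of A's bottom-up DP table (alternative algorithm, same O(n)).


-- ===== PORT A =====
-- Literal port of A: build the list f of n+1 zeros, seed f[0..2], fill by the loop, return f[n] % mod.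
-- (all indices used are provably in range, so pySetD/pyGetD coincide with Python's f[i] here)
def friends_pairing_problem (n : Int) : Int :=
  if n ≤ 2 then n
  else
    let M : Int := 1000000007
    let f : List Int := (PySem.List.pyRange 0 (n + 1) 1).map (fun _ => (0 : Int))
    let f := PySem.List.pySetD f 0 0
    let f := PySem.List.pySetD f 1 1
    let f := PySem.List.pySetD f 2 2
    let f := (PySem.List.pyRange 3 (n + 1) 1).foldl
      (fun f i =>
        PySem.List.pySetD f i
          (PySem.Int.mod
            (PySem.Int.mod (PySem.List.pyGetD f (i - 1) 0) M
              + PySem.Int.mod ((i - 1) * PySem.List.pyGetD f (i - 2) 0) M) M)) f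
    PySem.Int.mod (PySem.List.pyGetD f n 0) M

-- ===== PORT B =====
-- _mul: 2x2 modular matrix product, matrices as flat 4-tuples (a,b,c,d) = [[a,b],[c,d]]
def pvMul (x y : Int × Int × Int × Int) : Int × Int × Int × Int :=
  match x, y with
  | (a, b, c, d), (e, f, g, h) =>
    (PySem.Int.mod (a * e + b * g) 1000000007, PySem.Int.mod (a * f + b * h) 1000000007,
     PySem.Int.mod (c * e + d * g) 1000000007, PySem.Int.mod (c * f + d * h) 1000000007)

-- _prod: divide-and-conquer product step(hi-1) * ... * step(lo), step(i) = [[0,1],[i-1,1]]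
def pvProd (lo hi : Int) : Int × Int × Int × Int :=
  if _h : hi - lo ≤ 1 then (0, 1, PySem.Int.mod (lo - 1) 1000000007, 1)
  else
    let mid := PySem.Int.floordiv (lo + hi) 2
    pvMul (pvProd mid hi) (pvProd lo mid)
termination_by (hi - lo).toNat
decreasing_by
  · have h1 : lo + 1 ≤ PySem.Int.floordiv (lo + hi) 2 :=
      (PySem.Int.le_floordiv_iff_mul_le (by norm_num)).mpr (by omega)
    have h2 : PySem.Int.floordiv (lo + hi) 2 < hi :=
      (PySem.Int.floordiv_lt_iff_lt_mul (by norm_num)).mpr (by omega)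
    omega
  · have h1 : lo + 1 ≤ PySem.Int.floordiv (lo + hi) 2 :=
      (PySem.Int.le_floordiv_iff_mul_le (by norm_num)).mpr (by omega)
    have h2 : PySem.Int.floordiv (lo + hi) 2 < hi :=
      (PySem.Int.floordiv_lt_iff_lt_mul (by norm_num)).mpr (by omega)
    omega

def friends_pairing_problem_alt (n : Int) : Int :=
  if n ≤ 2 then n
  else
    match pvProd 3 (n + 1) with
    | (_a, _b, c, d) => PySem.Int.mod (c + 2 * d) 1000000007

-- ===== PRECONDITION & SPEC =====
def Spec_friends_pairing_problem (n : Int) (out : Int) : Prop := out = friends_pairing_problem_alt n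
instance (n : Int) (out : Int) : Decidable (Spec_friends_pairing_problem n out) := by unfold Spec_friends_pairing_problem; infer_instance

-- ===== CLAIM (what is proved, stated in full; the proofs are below) =====
def Claim_equal_friends_pairing_problem : Prop := ∀ (n : Int), Dom_friends_pairing_problem n → Spec_friends_pairing_problem n (friends_pairing_problem n)

-- ===== LEMMAS AND PROOFS =====

-- reference sequence: F k = f[k] of A's table (already reduced mod 1e9+7 from index 3 on)
def Fref : Nat → Int
  | 0 => 0
  | 1 => 1
  | 2 => 2
  | (k + 3) => PySem.Int.mod (Fref (k + 2) + ((k : Int) + 2) * Fref (k + 1)) 1000000007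

-- the step matrix, and a matrix applied to a column vector (mod p)
def pvStep (i : Int) : Int × Int × Int × Int := (0, 1, PySem.Int.mod (i - 1) 1000000007, 1)

def pvApply (x : Int × Int × Int × Int) (v : Int × Int) : Int × Int :=
  (PySem.Int.mod (x.1 * v.1 + x.2.1 * v.2) 1000000007,
   PySem.Int.mod (x.2.2.1 * v.1 + x.2.2.2 * v.2) 1000000007)

-- emod arithmetic: dropping inner reductions mod 1e9+7
theorem pvModMix (x u y w : Int) :
    (x % 1000000007 * u + y % 1000000007 * w) % 1000000007 = (x * u + y * w) % 1000000007 := by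
  have hx : Int.ModEq 1000000007 (x % 1000000007) x := Int.emod_emod_of_dvd x dvd_rfl
  have hy : Int.ModEq 1000000007 (y % 1000000007) y := Int.emod_emod_of_dvd y dvd_rfl
  exact (hx.mul_right u).add (hy.mul_right w)

theorem pvModMix2 (a x b y : Int) :
    (a * (x % 1000000007) + b * (y % 1000000007)) % 1000000007 = (a * x + b * y) % 1000000007 := by
  have hx : Int.ModEq 1000000007 (x % 1000000007) x := Int.emod_emod_of_dvd x dvd_rfl
  have hy : Int.ModEq 1000000007 (y % 1000000007) y := Int.emod_emod_of_dvd y dvd_rfl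
  exact (hx.mul_left a).add (hy.mul_left b)

theorem pvModMix1 (x u y : Int) :
    (x % 1000000007 * u + y) % 1000000007 = (x * u + y) % 1000000007 := by
  have hx : Int.ModEq 1000000007 (x % 1000000007) x := Int.emod_emod_of_dvd x dvd_rfl
  exact (hx.mul_right u).add_right y

theorem apply_mul (x y : Int × Int × Int × Int) (v : Int × Int) :
    pvApply (pvMul x y) v = pvApply x (pvApply y v) := by
  obtain ⟨a, b, c, d⟩ := x
  obtain ⟨e, f, g, h⟩ := y
  obtain ⟨u, w⟩ := v
  simp only [pvApply, pvMul,
    PySem.Int.mod_eq_emod_of_pos (by norm_num : (0:Int) < 1000000007)]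
  rw [Prod.mk.injEq]
  constructor <;>
  · rw [pvModMix, pvModMix2]
    congr 1
    ring

theorem pyRange_one_split (a m b : Int) (h1 : a ≤ m) (h2 : m ≤ b) :
    PySem.List.pyRange a b 1 = PySem.List.pyRange a m 1 ++ PySem.List.pyRange m b 1 := by
  have hk : (b - a).toNat = (m - a).toNat + (b - m).toNat := by omega
  rw [PySem.List.pyRange_one, PySem.List.pyRange_one, PySem.List.pyRange_one, hk,
    List.range_add, List.map_append, List.map_map]
  congr 1
  apply List.map_congr_left
  intro x hx
  simp only [Function.comp]
  omega

-- D&C product applied to a vector = the sequential left fold of the step matrices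
theorem prod_apply (k : Nat) (hk : 1 ≤ k) : ∀ (lo : Int) (v : Int × Int),
    pvApply (pvProd lo (lo + k)) v
      = (PySem.List.pyRange lo (lo + k) 1).foldl (fun v i => pvApply (pvStep i) v) v := by
  induction k using Nat.strong_induction_on with
  | _ k ih =>
    intro lo v
    rw [pvProd]
    by_cases h1 : k = 1
    · subst h1
      simp only [Nat.cast_one]
      rw [dif_pos (by omega)]
      rw [PySem.List.pyRange_one_cons (by omega),
        PySem.List.pyRange_one_eq_nil (le_refl (lo + 1))]
      simp [pvStep]
    · have hk2 : 2 ≤ k := by omega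
      rw [dif_neg (by omega)]
      set mid := PySem.Int.floordiv (lo + (lo + (k : Int))) 2 with hmid
      have hm1 : lo + 1 ≤ mid :=
        (PySem.Int.le_floordiv_iff_mul_le (by norm_num)).mpr (by omega)
      have hm2 : mid < lo + (k : Int) :=
        (PySem.Int.floordiv_lt_iff_lt_mul (by norm_num)).mpr (by omega)
      set m : Nat := (mid - lo).toNat with hm
      have hms : mid = lo + (m : Int) := by omega
      have hrest : lo + (k : Int) = mid + ((k - m : Nat) : Int) := by omega
      rw [apply_mul,
        show pvProd lo mid = pvProd lo (lo + (m : Int)) from by rw [← hms],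
        ih m (by omega) (by omega) lo v,
        show pvProd mid (lo + (k : Int)) = pvProd mid (mid + ((k - m : Nat) : Int)) from by
          rw [← hrest],
        ih (k - m) (by omega) (by omega) mid _, ← hms, ← hrest,
        pyRange_one_split lo mid (lo + (k : Int)) (by omega) (by omega), List.foldl_append]

-- Fref is reduced mod 1e9+7 for every index ≥ 1 (indices 1,2 are literals, the rest are mod results)
theorem Fref_bounds (k : Nat) (hk : 1 ≤ k) : 0 ≤ Fref k ∧ Fref k < 1000000007 := by
  match k with
  | 1 => simp [Fref]
  | 2 => simp [Fref]
  | (j + 3) =>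
    rw [Fref]
    exact ⟨PySem.Int.mod_nonneg _ (by norm_num), PySem.Int.mod_lt _ (by norm_num)⟩

-- the sequential fold of the step matrices computes A's pair (f[i-1], f[i])
theorem fold_steps_eq (k : Nat) :
    (PySem.List.pyRange 3 (3 + (k : Int)) 1).foldl (fun v i => pvApply (pvStep i) v) (1, 2)
      = (Fref (k + 1), Fref (k + 2)) := by
  induction k with
  | zero => simp [PySem.List.pyRange_one_eq_nil, Fref]
  | succ k ih =>
      have h : (3 : Int) + ((k : Int) + 1) = (3 + (k : Int)) + 1 := by ring
      rw [Nat.cast_add, Nat.cast_one, h,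
        PySem.List.pyRange_one_succ_right (by omega), List.foldl_append, ih]
      simp only [List.foldl_cons, List.foldl_nil, pvApply, pvStep,
        PySem.Int.mod_eq_emod_of_pos (by norm_num : (0:Int) < 1000000007)]
      have hb := Fref_bounds (k + 2) (by omega)
      rw [Prod.mk.injEq]
      constructor
      · simpa using Int.emod_eq_of_lt hb.1 hb.2
      · rw [pvModMix1]
        show _ = Fref (k + 3)
        rw [Fref, PySem.Int.mod_eq_emod_of_pos (by norm_num : (0:Int) < 1000000007)]
        congr 1
        ring

theorem a_fold_inv (f0 : List Int) (N : Nat) (hlen : f0.length = N + 1)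
    (h0 : f0.getD 0 0 = Fref 0) (h1 : f0.getD 1 0 = Fref 1) (h2 : f0.getD 2 0 = Fref 2)
    (k : Nat) (hk : k + 2 ≤ N) :
    let g := (PySem.List.pyRange 3 (3 + (k : Int)) 1).foldl
      (fun f i =>
        PySem.List.pySetD f i
          (PySem.Int.mod
            (PySem.Int.mod (PySem.List.pyGetD f (i - 1) 0) 1000000007
              + PySem.Int.mod ((i - 1) * PySem.List.pyGetD f (i - 2) 0) 1000000007) 1000000007)) f0
    g.length = N + 1 ∧ ∀ j : Nat, j ≤ k + 2 → g.getD j 0 = Fref j := by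
  induction k with
  | zero =>
      simp only [Nat.cast_zero, add_zero, PySem.List.pyRange_one_eq_nil (le_refl (3:Int)),
        List.foldl_nil]
      refine ⟨hlen, fun j hj => ?_⟩
      interval_cases j <;> assumption
  | succ k ih =>
      have ih' := ih (by omega)
      obtain ⟨ihlen, ihval⟩ := ih'
      have h : (3 : Int) + ((k : Int) + 1) = (3 + (k : Int)) + 1 := by ring
      rw [Nat.cast_add, Nat.cast_one, h,
        PySem.List.pyRange_one_succ_right (by omega), List.foldl_append]
      simp only [List.foldl_cons, List.foldl_nil]
      set g := (PySem.List.pyRange 3 (3 + (k : Int)) 1).foldl _ f0 with hg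
      have e1 : (3 : Int) + (k : Int) - 1 = ((k + 2 : Nat) : Int) := by push_cast; ring
      have e2 : (3 : Int) + (k : Int) - 2 = ((k + 1 : Nat) : Int) := by push_cast; ring
      have e3 : (3 : Int) + (k : Int) = ((k + 3 : Nat) : Int) := by push_cast; ring
      rw [e1, e2, e3, PySem.List.pyGetD_natCast, PySem.List.pyGetD_natCast,
        ihval (k + 2) (by omega), ihval (k + 1) (by omega), PySem.List.pySetD_natCast]
      constructor
      · rw [List.length_set]; exact ihlen
      · intro j hj
        by_cases hje : j = k + 3
        · subst hje
          rw [List.getD, List.getElem?_set_self (by omega), Option.getD_some]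
          simp only [Fref]
          have hm : ∀ a b : Int,
              PySem.Int.mod (PySem.Int.mod a 1000000007 + PySem.Int.mod b 1000000007) 1000000007
                = PySem.Int.mod (a + b) 1000000007 := by
            intro a b
            simp only [PySem.Int.mod_eq_emod_of_pos (by norm_num : (0:Int) < 1000000007)]
            rw [← Int.add_emod]
          rw [hm, show (((k + 2 : Nat)) : Int) = (k : Int) + 2 from by push_cast; ring]
        · rw [List.getD, List.getElem?_set_ne (by omega), ← List.getD]
          exact ihval j (by omega)

-- ===== VERDICT (by name: the statement is the Claim_ definition above) =====
theorem friends_pairing_problem_spec : Claim_equal_friends_pairing_problem := by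
  intro n _
  unfold Spec_friends_pairing_problem friends_pairing_problem friends_pairing_problem_alt
  by_cases hn : n ≤ 2
  · simp [hn]
  · simp only [if_neg hn]
    have hn3 : (3 : Int) ≤ n := by omega
    set N := n.toNat with hN
    have hN3 : 3 ≤ N := by omega
    have hup : n + 1 = 3 + ((N - 2 : Nat) : Int) := by omega
    -- ---- A's side: the table value is Fref N ----
    have hbase : (PySem.List.pyRange 0 (n + 1) 1).map (fun _ => (0 : Int))
        = List.replicate (N + 1) (0 : Int) := by
      rw [List.map_const']
      congr 1
      rw [PySem.List.length_pyRange_one]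
      omega
    rw [hbase]
    have hseed : PySem.List.pySetD (PySem.List.pySetD (PySem.List.pySetD
          (List.replicate (N + 1) (0 : Int)) 0 0) 1 1) 2 2
        = (((List.replicate (N + 1) (0 : Int)).set 0 0).set 1 1).set 2 2 := by
      simp [PySem.List.pySetD_of_nonneg]
    rw [hseed]
    set f0 : List Int := (((List.replicate (N + 1) (0 : Int)).set 0 0).set 1 1).set 2 2 with hf0
    have hlen : f0.length = N + 1 := by simp [hf0]
    have g0 : f0.getD 0 0 = Fref 0 := by
      simp [hf0, List.getD, Fref]
    have g1 : f0.getD 1 0 = Fref 1 := by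
      simp [hf0, List.getD, Fref, show 0 < N from by omega]
    have g2 : f0.getD 2 0 = Fref 2 := by
      simp [hf0, List.getD, Fref, show 2 ≤ N from by omega]
    have hinv := a_fold_inv f0 N hlen g0 g1 g2 (N - 2) (by omega)
    simp only at hinv
    obtain ⟨-, hval⟩ := hinv
    rw [hup]
    rw [show n = ((N : Nat) : Int) from by omega, PySem.List.pyGetD_natCast,
      hval N (by omega)]
    -- ---- B's side: the matrix product applied to (1,2) is (Fref (N-1), Fref N) ----
    have hB := prod_apply (N - 2) (by omega) 3 ((1 : Int), (2 : Int))
    rw [fold_steps_eq (N - 2), show N - 2 + 2 = N from by omega] at hB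
    have hred : PySem.Int.mod (Fref N) 1000000007 = Fref N := by
      have hb := Fref_bounds N (by omega)
      rw [PySem.Int.mod_eq_emod_of_pos (by norm_num : (0:Int) < 1000000007)]
      exact Int.emod_eq_of_lt hb.1 hb.2
    rcases hP : pvProd 3 (3 + ((N - 2 : Nat) : Int)) with ⟨a, b, c, d⟩
    rw [hP] at hB
    have hB2 := congrArg Prod.snd hB
    simp only [pvApply] at hB2
    rw [hred]
    show Fref N = PySem.Int.mod (c + 2 * d) 1000000007
    rw [show c + 2 * d = c * 1 + d * 2 from by ring]
    exact hB2.symm
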